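-- pv_equiv track=rewrite | github.com/davidasnider/scripts | main.py | _resolve_worker_counts
-- ===== SOURCE A (Python) =====
-- NUM_EXTRACTION_WORKERS = 5
--
-- NUM_ANALYSIS_WORKERS = (
--     2  # AI analysis remains a bottleneck; keep a few dedicated threads
-- )
--
-- NUM_DATABASE_WORKERS = 1
--
-- MINIMUM_WORKER_TOTAL = 3
--
-- def _resolve_worker_counts(
--     max_threads: int | None,
-- ) -> tuple[int, int, int, int | None, bool]:
--     """
--     Determine worker thread counts after applying an optional max_threads limit.
--
--     Returns:
--         tuple: extraction_workers, analysis_workers, database_workers,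
--         applied_limit (or None if unused), limit_was_increased (bool).
--     """
--
--     extraction_workers = NUM_EXTRACTION_WORKERS
--     analysis_workers = NUM_ANALYSIS_WORKERS
--     database_workers = NUM_DATABASE_WORKERS
--
--     if not max_threads or max_threads <= 0:
--         return extraction_workers, analysis_workers, database_workers, None, False
--
--     applied_limit = max(max_threads, MINIMUM_WORKER_TOTAL)
--     limit_was_increased = applied_limit != max_threads
--
--     worker_counts = {
--         "analysis": analysis_workers,
--         "extraction": extraction_workers,
--         "database": database_workers,
--     }
--     total_workers = sum(worker_counts.values())
--
--     while total_workers > applied_limit: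
--         for key in ("analysis", "extraction", "database"):
--             min_allowed = 1
--             if worker_counts[key] > min_allowed:
--                 worker_counts[key] -= 1
--                 total_workers -= 1
--                 break
--         else:
--             break
--
--     return (
--         worker_counts["extraction"],
--         worker_counts["analysis"],
--         worker_counts["database"],
--         applied_limit,
--         limit_was_increased,
--     )
-- ===== SOURCE B (Python) =====
-- NUM_EXTRACTION_WORKERS = 5
-- NUM_ANALYSIS_WORKERS = 2
-- NUM_DATABASE_WORKERS = 1
-- MINIMUM_WORKER_TOTAL = 3
--
--
-- def _resolve_worker_counts(max_threads):
--     if not max_threads or max_threads <= 0: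
--         return (
--             NUM_EXTRACTION_WORKERS,
--             NUM_ANALYSIS_WORKERS,
--             NUM_DATABASE_WORKERS,
--             None,
--             False,
--         )
--     applied_limit = max(max_threads, MINIMUM_WORKER_TOTAL)
--     total = NUM_EXTRACTION_WORKERS + NUM_ANALYSIS_WORKERS + NUM_DATABASE_WORKERS
--     deficit = max(0, total - applied_limit)
--     analysis_reduction = min(deficit, NUM_ANALYSIS_WORKERS - 1)
--     extraction_reduction = min(deficit - analysis_reduction, NUM_EXTRACTION_WORKERS - 1)
--     return (
--         NUM_EXTRACTION_WORKERS - extraction_reduction,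
--         NUM_ANALYSIS_WORKERS - analysis_reduction,
--         NUM_DATABASE_WORKERS,
--         applied_limit,
--         max_threads < MINIMUM_WORKER_TOTAL,
--     )
-- ===== Notes on version B (the rewrite author's own statement) =====
-- stated objective: simpler
-- what changed: Replaces the while-loop round-robin reduction over a dict with a closed-form arithmetic distribution of the deficit (min/max on the fixed priority order), no loop and no dict.
import Mathlib
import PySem

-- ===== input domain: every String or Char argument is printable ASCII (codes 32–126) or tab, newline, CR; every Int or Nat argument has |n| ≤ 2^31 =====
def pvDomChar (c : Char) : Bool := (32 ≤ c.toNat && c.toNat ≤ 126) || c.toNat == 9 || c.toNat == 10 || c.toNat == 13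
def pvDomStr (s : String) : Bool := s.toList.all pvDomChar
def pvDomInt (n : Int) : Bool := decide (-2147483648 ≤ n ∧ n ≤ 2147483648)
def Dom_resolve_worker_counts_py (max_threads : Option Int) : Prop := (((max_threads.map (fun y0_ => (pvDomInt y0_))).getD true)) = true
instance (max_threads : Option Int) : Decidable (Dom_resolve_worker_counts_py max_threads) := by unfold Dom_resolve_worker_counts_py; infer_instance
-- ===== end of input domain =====

-- B replaces A's while-loop/dict reduction with a closed-form arithmetic distribution of the deficit (simpler).


-- ===== PORT A =====
-- the 'while total_workers > applied_limit' loop with the inner 'for key in (...): break / else: break';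
-- fuel is only a totality device: each iteration lowers total by 1, so (total - applied_limit).toNat suffices
def rwcLoopAGo (wc : PySem.Dict String Int) (total applied_limit : Int) : Nat → PySem.Dict String Int
  | 0 => wc
  | fuel + 1 =>
    if total > applied_limit then
      if wc.getD "analysis" 0 > 1 then
        rwcLoopAGo (wc.insert "analysis" (wc.getD "analysis" 0 - 1)) (total - 1) applied_limit fuel
      else if wc.getD "extraction" 0 > 1 then
        rwcLoopAGo (wc.insert "extraction" (wc.getD "extraction" 0 - 1)) (total - 1) applied_limit fuel
      else if wc.getD "database" 0 > 1 then
        rwcLoopAGo (wc.insert "database" (wc.getD "database" 0 - 1)) (total - 1) applied_limit fuel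
      else wc
    else wc

def rwcLoopA (wc : PySem.Dict String Int) (total applied_limit : Int) : PySem.Dict String Int :=
  rwcLoopAGo wc total applied_limit (total - applied_limit).toNat

def resolve_worker_counts_py (max_threads : Option Int) : Int × Int × Int × Option Int × Bool :=
  let extraction_workers : Int := 5
  let analysis_workers : Int := 2
  let database_workers : Int := 1
  match max_threads with
  | none => (extraction_workers, analysis_workers, database_workers, none, false)
  | some m =>
    if m ≤ 0 then (extraction_workers, analysis_workers, database_workers, none, false)
    else
      let applied_limit : Int := max m 3
      let limit_was_increased : Bool := decide (applied_limit ≠ m)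
      let wc : PySem.Dict String Int :=
        ((PySem.Dict.empty.insert "analysis" analysis_workers).insert "extraction" extraction_workers).insert "database" database_workers
      let total_workers : Int := wc.values.sum
      let wc' := rwcLoopA wc total_workers applied_limit
      (wc'.getD "extraction" 0, wc'.getD "analysis" 0, wc'.getD "database" 0, some applied_limit, limit_was_increased)

-- ===== PORT B =====
def resolve_worker_counts_py_alt (max_threads : Option Int) : Int × Int × Int × Option Int × Bool :=
  match max_threads with
  | none => (5, 2, 1, none, false)
  | some m =>
    if m ≤ 0 then (5, 2, 1, none, false)
    else
      let applied_limit : Int := max m 3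
      let deficit : Int := max 0 ((5 + 2 + 1) - applied_limit)
      let analysis_reduction : Int := min deficit (2 - 1)
      let extraction_reduction : Int := min (deficit - analysis_reduction) (5 - 1)
      (5 - extraction_reduction, 2 - analysis_reduction, 1, some applied_limit, decide (m < 3))

-- ===== PRECONDITION & SPEC =====
def Spec_resolve_worker_counts_py (max_threads : Option Int) (out : Int × Int × Int × Option Int × Bool) : Prop := out = resolve_worker_counts_py_alt max_threads
instance (max_threads : Option Int) (out : Int × Int × Int × Option Int × Bool) : Decidable (Spec_resolve_worker_counts_py max_threads out) := by unfold Spec_resolve_worker_counts_py; infer_instance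

-- ===== CLAIM (what is proved, stated in full; the proofs are below) =====
def Claim_equal_resolve_worker_counts_py : Prop := ∀ (max_threads : Option Int), Dom_resolve_worker_counts_py max_threads → Spec_resolve_worker_counts_py max_threads (resolve_worker_counts_py max_threads)

-- ===== LEMMAS AND PROOFS =====

theorem rwcLoopA_ge (wc : PySem.Dict String Int) (total L : Int) (h : ¬ total > L) :
    rwcLoopA wc total L = wc := by
  have : (total - L).toNat = 0 := by omega
  rw [rwcLoopA, this, rwcLoopAGo]

-- ===== VERDICT (by name: the statement is the Claim_ definition above) =====
theorem resolve_worker_counts_py_spec : Claim_equal_resolve_worker_counts_py := by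
  intro mt _
  unfold Spec_resolve_worker_counts_py
  match mt with
  | none => rfl
  | some m =>
    by_cases h0 : m ≤ 0
    · simp [resolve_worker_counts_py, resolve_worker_counts_py_alt, h0]
    · by_cases h8 : 8 ≤ m
      · have hmax : max m 3 = m := by omega
        have hsum : (((PySem.Dict.empty.insert "analysis" (2 : Int)).insert "extraction" 5).insert
            "database" 1).values.sum = 8 := by decide
        simp only [resolve_worker_counts_py, resolve_worker_counts_py_alt, if_neg h0, hmax, hsum]
        rw [rwcLoopA_ge _ _ _ (by omega)]
        have hd : max 0 (5 + 2 + 1 - m) = 0 := by omega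
        simp [PySem.Dict.getD_insert]
        omega
      · -- 1 ≤ m ≤ 7: finitely many cases, everything is a closed computation
        interval_cases m <;> decide
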